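-- pv_equiv track=rewrite | github.com/prl43/python-cah-AI | cah/cards.py | filter_multi_blanks
-- ===== SOURCE A (Python) =====
-- def filter_multi_blanks(arr):
--     for i in reversed(range(len(arr))):
--         s = arr[i]
--         inside = False
--         count = 0
--         for c in s:
--             if c == '_':
--                 if not inside:
--                     count += 1
--                     inside = True
--             else:
--                 inside = False
--         if count > 1:
--             del(arr[i])
--
--     return arr
-- ===== SOURCE B (Python) =====
-- def filter_multi_blanks(arr):
--     # A string is kept iff it matches (non-underscore)* underscore* (non-underscore)*:
--     # skip the non-underscore prefix, then the single underscore block, then the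
--     # non-underscore suffix; anything left over means a second underscore block.
--     def skip(s, i, keep):
--         while i < len(s) and keep(s[i]):
--             i += 1
--         return i
--
--     def one_block(s):
--         i = skip(s, 0, lambda c: c != '_')
--         i = skip(s, i, lambda c: c == '_')
--         i = skip(s, i, lambda c: c != '_')
--         return i == len(s)
--
--     arr[:] = [s for s in arr if one_block(s)]
--     return arr
-- ===== Notes on version B (the rewrite author's own statement) =====
-- stated objective: alternative
-- what changed: Instead of A's one-pass flag automaton that counts underscore runs and deletes in place while walking indices backwards, B decides membership by pattern-matching each string against (non-underscore)* underscore* (non-underscore)* via three sequential index-skip phases (skip prefix, skip the single underscore block, skip suffix; kept iff the end of the string is reached), and rebuilds arr once with a slice assignment.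
import Mathlib
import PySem

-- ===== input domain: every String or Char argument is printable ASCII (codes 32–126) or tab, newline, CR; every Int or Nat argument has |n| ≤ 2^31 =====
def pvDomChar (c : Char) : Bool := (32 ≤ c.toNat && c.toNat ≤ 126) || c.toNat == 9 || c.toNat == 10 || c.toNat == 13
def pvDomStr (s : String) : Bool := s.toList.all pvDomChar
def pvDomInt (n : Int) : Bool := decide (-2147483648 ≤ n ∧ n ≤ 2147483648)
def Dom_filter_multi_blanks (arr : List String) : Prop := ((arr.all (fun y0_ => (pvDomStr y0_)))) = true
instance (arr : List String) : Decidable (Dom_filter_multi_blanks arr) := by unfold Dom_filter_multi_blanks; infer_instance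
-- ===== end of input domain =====

-- B replaces A's run-counting flag automaton by a three-phase pattern match
-- ((non-_)* (_)* (non-_)*); both mutate arr in place, the proof is about the return value.
-- ===== PORT A =====
-- step of A's inner scan: (inside, count) updated per character
def stepA (st : Bool × Int) (c : Char) : Bool × Int :=
  if c = '_' then (if ¬ st.1 then (true, st.2 + 1) else st) else (false, st.2)

def runCountA (l : List Char) : Bool × Int :=
  l.foldl stepA (false, 0)

def filterALoop : Nat → List String → List String
  | 0, arr => arr
  | i + 1, arr =>
    let s := arr.getD i ""
    let count := (runCountA s.toList).2
    filterALoop i (if count > 1 then arr.eraseIdx i else arr)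

def filter_multi_blanks (arr : List String) : List String :=
  filterALoop arr.length arr

-- ===== PORT B =====
-- B's two lambda predicates, named so the ports and lemmas share them
def neP (c : Char) : Bool := c ≠ '_'
def eqP (c : Char) : Bool := c = '_'

-- B's skip(s, i, keep): advance i while the current character satisfies keep
def skipB (s : List Char) (keep : Char → Bool) (i : Nat) : Nat :=
  if h : i < s.length then
    if keep s[i] then skipB s keep (i + 1) else i
  else i
termination_by s.length - i
decreasing_by omega

-- B's one_block: skip the non-underscore prefix, the underscore block, the
-- non-underscore suffix; the string is a single block iff nothing is left
def oneBlockB (s : String) : Bool :=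
  let l := s.toList
  let i1 := skipB l neP 0
  let i2 := skipB l eqP i1
  let i3 := skipB l neP i2
  i3 == l.length

def filter_multi_blanks_alt (arr : List String) : List String :=
  arr.filter (fun s => oneBlockB s)

-- ===== PRECONDITION & SPEC =====
def Spec_filter_multi_blanks (arr : List String) (out : List String) : Prop := out = filter_multi_blanks_alt arr
instance (arr : List String) (out : List String) : Decidable (Spec_filter_multi_blanks arr out) := by unfold Spec_filter_multi_blanks; infer_instance

-- ===== CLAIM (what is proved, stated in full; the proofs are below) =====
def Claim_equal_filter_multi_blanks : Prop := ∀ (arr : List String), Dom_filter_multi_blanks arr → Spec_filter_multi_blanks arr (filter_multi_blanks arr)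

-- ===== LEMMAS AND PROOFS =====

-- number of maximal '_' runs, tracking whether the previous char was '_'
def starts (prev : Bool) : List Char → Nat
  | [] => 0
  | c :: t => (if c = '_' ∧ prev = false then 1 else 0) + starts (c = '_') t

theorem runCountA_starts (l : List Char) (b : Bool) (k : Int) :
    (l.foldl stepA (b, k)).2 = k + (starts b l : Int) := by
  induction l generalizing b k with
  | nil => simp [starts]
  | cons c t ih =>
    rw [List.foldl_cons]
    by_cases hc : c = '_' <;> cases b
    · rw [show stepA (false, k) c = (true, k + 1) from by simp [stepA, hc], ih]
      simp [starts, hc]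
      ring
    · rw [show stepA (true, k) c = (true, k) from by simp [stepA, hc], ih]
      simp [starts, hc]
    · rw [show stepA (false, k) c = (false, k) from by simp [stepA, hc], ih]
      simp [starts, hc]
    · rw [show stepA (true, k) c = (false, k) from by simp [stepA, hc], ih]
      simp [starts, hc]

-- skipB reaches exactly the position where dropWhile would stop
theorem skipB_drop (s : List Char) (keep : Char → Bool) (i : Nat) (h : i ≤ s.length) :
    skipB s keep i ≤ s.length ∧ s.drop (skipB s keep i) = (s.drop i).dropWhile keep := by
  fun_induction skipB s keep i with
  | case1 i hlt hkeep ih =>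
    obtain ⟨h1, h2⟩ := ih (by omega)
    refine ⟨h1, ?_⟩
    rw [h2, List.drop_eq_getElem_cons hlt, List.dropWhile_cons_of_pos hkeep]
  | case2 i hlt hkeep =>
    refine ⟨h, ?_⟩
    rw [List.drop_eq_getElem_cons hlt,
      List.dropWhile_cons_of_neg (by simp [Bool.not_eq_true] at hkeep ⊢; exact hkeep)]
  | case3 i hlt =>
    have hle : s.length ≤ i := by omega
    refine ⟨h, ?_⟩
    simp [List.drop_eq_nil_of_le hle]

-- the head of a dropWhile result falsifies the predicate
theorem head_dropWhile_false (p : Char → Bool) (l : List Char) (c : Char) (t : List Char)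
    (h : l.dropWhile p = c :: t) : p c = false := by
  induction l with
  | nil => simp at h
  | cons a l ih =>
    by_cases hp : p a = true
    · rw [List.dropWhile_cons_of_pos hp] at h
      exact ih h
    · rw [List.dropWhile_cons_of_neg hp] at h
      cases h
      simpa using hp

-- run count is unchanged by dropping a non-underscore prefix
theorem starts_dropWhile_ne (l : List Char) :
    starts false (l.dropWhile neP) = starts false l := by
  induction l with
  | nil => rfl
  | cons c t ih =>
    by_cases hc : c = '_'
    · rw [List.dropWhile_cons_of_neg (by simp [neP, hc])]
    · rw [List.dropWhile_cons_of_pos (by simp [neP, hc])]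
      rw [ih, show starts false (c :: t) = starts false t from by simp [starts, hc]]

-- after an underscore, dropping further underscores changes nothing
theorem starts_dropWhile_eq (l : List Char) :
    starts true (l.dropWhile eqP) = starts true l := by
  induction l with
  | nil => rfl
  | cons c t ih =>
    by_cases hc : c = '_'
    · rw [List.dropWhile_cons_of_pos (by simp [eqP, hc])]
      rw [ih, show starts true (c :: t) = starts true t from by simp [starts, hc]]
    · rw [List.dropWhile_cons_of_neg (by simp [eqP, hc])]

-- the three-phase remainder is empty exactly when there is at most one run
theorem phases_iff (l : List Char) :
    (((l.dropWhile neP).dropWhile eqP).dropWhile neP = []) ↔ starts false l ≤ 1 := by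
  rw [← starts_dropWhile_ne l]
  rcases hd1 : l.dropWhile neP with _ | ⟨c, t⟩
  · simp [starts]
  · have hc : c = '_' := by
      have := head_dropWhile_false neP l c t hd1
      simpa [neP] using this
    subst hc
    rw [List.dropWhile_cons_of_pos (by simp [eqP])]
    rw [show starts false ('_' :: t) = 1 + starts true t from by simp [starts]]
    rw [← starts_dropWhile_eq t]
    rcases hd2 : t.dropWhile eqP with _ | ⟨c2, t2⟩
    · simp [starts]
    · have hc2 : ¬ (c2 = '_') := by
        have := head_dropWhile_false eqP t c2 t2 hd2
        simpa [eqP] using this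
      rw [show starts true (c2 :: t2) = starts false (c2 :: t2) from by simp [starts, hc2]]
      rw [← starts_dropWhile_ne (c2 :: t2)]
      rcases hd3 : (c2 :: t2).dropWhile neP with _ | ⟨c3, t3⟩
      · simp [starts]
      · have hc3 : c3 = '_' := by
          have := head_dropWhile_false neP (c2 :: t2) c3 t3 hd3
          simpa [neP] using this
        subst hc3
        simp [starts]

-- B keeps a string exactly when A's count is at most 1
theorem oneBlock_iff (s : String) :
    oneBlockB s = true ↔ (runCountA s.toList).2 ≤ 1 := by
  unfold oneBlockB
  have h1 := skipB_drop s.toList neP 0 (by omega)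
  have h2 := skipB_drop s.toList eqP _ h1.1
  have h3 := skipB_drop s.toList neP _ h2.1
  simp only [List.drop_zero] at h1
  rw [h1.2] at h2
  rw [h2.2] at h3
  have hiff : (skipB s.toList neP (skipB s.toList eqP (skipB s.toList neP 0))
        = s.toList.length) ↔
      (((s.toList.dropWhile neP).dropWhile eqP).dropWhile neP = []) := by
    constructor
    · intro he
      rw [← h3.2, he, List.drop_length]
    · intro he
      rw [he] at h3
      have hdrop := h3.2
      have hlen := List.length_drop (l := s.toList)
          (i := skipB s.toList neP (skipB s.toList eqP (skipB s.toList neP 0)))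
      rw [hdrop] at hlen
      simp only [List.length_nil] at hlen
      omega
  rw [show (runCountA s.toList).2 = 0 + (starts false s.toList : Int) from
    runCountA_starts s.toList false 0]
  simp only [beq_iff_eq]
  rw [hiff, phases_iff]
  omega

def drop_eraseIdx_self (l : List String) (i : Nat) (h : i < l.length) :
    (l.eraseIdx i).drop i = l.drop (i + 1) := by
  rw [List.eraseIdx_eq_take_drop_succ]
  rw [List.drop_left' (by simp [min_eq_left (le_of_lt h)])]

-- the downward deletion loop filters the first i elements and leaves the tail untouched
theorem filterALoop_eq (arr : List String) (i : Nat) (h : i ≤ arr.length) :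
    filterALoop i arr = (arr.take i).filter (fun s => oneBlockB s) ++ arr.drop i := by
  induction i generalizing arr with
  | zero => simp [filterALoop]
  | succ i ih =>
    have hi : i < arr.length := h
    simp only [filterALoop]
    have hget : arr.getD i "" = arr[i] := List.getD_eq_getElem arr "" hi
    have htake : arr.take (i + 1) = arr.take i ++ [arr[i]] := List.take_succ_eq_append_getElem hi
    by_cases hb : (runCountA (arr.getD i "").toList).2 > 1
    · have hkeep : oneBlockB arr[i] = false := by
        rw [← Bool.not_eq_true, oneBlock_iff]
        rw [hget] at hb; omega
      rw [if_pos hb, ih _ (by rw [List.length_eraseIdx_of_lt hi]; omega)]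
      rw [List.take_eraseIdx_eq_take_of_le _ _ _ le_rfl, drop_eraseIdx_self _ _ hi]
      rw [htake, List.filter_append]
      simp [hkeep]
    · have hkeep : oneBlockB arr[i] = true := by
        rw [oneBlock_iff]
        rw [hget] at hb; omega
      rw [if_neg hb, ih arr (le_of_lt hi), htake, List.filter_append]
      rw [List.drop_eq_getElem_cons hi]
      simp [hkeep]

-- ===== VERDICT (by name: the statement is the Claim_ definition above) =====
theorem filter_multi_blanks_spec : Claim_equal_filter_multi_blanks := by
  intro arr _
  unfold Spec_filter_multi_blanks filter_multi_blanks filter_multi_blanks_alt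
  rw [filterALoop_eq arr arr.length le_rfl]
  simp only [List.take_length, List.drop_length, List.append_nil]
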